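-- pv_equiv track=rewrite | github.com/delli-88/strivers_sde_sheet | heaps/min_heap_implementation.py | minHeap
-- ===== SOURCE A (Python) =====
-- def heapify(arr, n, i):
--     smallest = i
--     left_child = 2 * i + 1
--     right_child = 2 * i + 2
--
--     if left_child < n and arr[left_child] < arr[smallest]:
--         smallest = left_child
--
--     if right_child < n and arr[right_child] < arr[smallest]:
--         smallest = right_child
--
--     if smallest != i:
--         arr[i], arr[smallest] = arr[smallest], arr[i]
--         heapify(arr, n, smallest)
--
-- def minHeap(N: int, Q):
--     min_heap = []
--     sol = []
--
--     for i in range(len(Q)):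
--         # insert
--         if Q[i][0] == 0:
--
--             min_heap.append(Q[i][1])
--             for i in range((len(min_heap)//2)-1,-1,-1):
--                 heapify(min_heap, len(min_heap), i)
--
--         # delete
--         else:
--             if min_heap:
--                 smallest = min_heap[0]
--                 sol.append(smallest)
--                 min_heap[0],min_heap[len(min_heap)-1] = min_heap[len(min_heap)-1],min_heap[0]
--                 min_heap.pop()
--                 # for i in range((len(min_heap)//2)-1,-1,-1):
--                 heapify(min_heap, len(min_heap), 0)
--
--     return sol
-- ===== SOURCE B (Python) =====
-- def minHeap(N: int, Q):
--     # Keep pending values in a descending-sorted list: extract-min pops the last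
--     # element in O(1); insert scans for the position and inserts.
--     heap = []  # sorted descending
--     sol = []
--     for q in Q:
--         if q[0] == 0:
--             v = q[1]
--             k = 0
--             while k < len(heap) and heap[k] > v:
--                 k += 1
--             heap.insert(k, v)
--         else:
--             if heap:
--                 sol.append(heap.pop())
--     return sol
-- ===== Notes on version B (the rewrite author's own statement) =====
-- stated objective: alternative
-- what changed: Replaces A's binary heap (a full Floyd heapify rebuild of the array on every insert, sift-down on extract) by a descending-sorted list: insert scans once for the insertion position, extract-min pops the last element.
-- outside the precondition, e.g. on minHeap(1, [[]]): A raises IndexError, B raises IndexError; on minHeap(1, [[0]]): A raises IndexError, B raises IndexError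
import Mathlib
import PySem

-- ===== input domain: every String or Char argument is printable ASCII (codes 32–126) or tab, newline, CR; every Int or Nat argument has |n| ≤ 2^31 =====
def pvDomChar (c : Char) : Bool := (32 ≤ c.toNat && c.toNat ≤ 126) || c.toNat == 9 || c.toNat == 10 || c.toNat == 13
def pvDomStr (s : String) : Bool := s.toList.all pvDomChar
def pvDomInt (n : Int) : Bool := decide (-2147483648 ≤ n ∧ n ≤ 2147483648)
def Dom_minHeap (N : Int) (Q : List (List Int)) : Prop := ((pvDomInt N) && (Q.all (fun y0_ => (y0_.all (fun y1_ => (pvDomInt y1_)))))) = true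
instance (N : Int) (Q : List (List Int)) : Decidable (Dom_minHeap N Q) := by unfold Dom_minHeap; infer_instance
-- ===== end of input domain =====

-- B replaces A's binary heap (a full Floyd heapify rebuild on every insert) by a
-- descending-sorted list: insert by a single linear scan, extract-min pops the last
-- element. A genuinely different data structure of similar overall cost.

-- ===== PORT A =====

-- arr[i], arr[j] = arr[j], arr[i]  (indices in range on every call made under Pre_)
def pySwap (arr : List Int) (i j : Nat) : List Int :=
  (arr.set i (arr.getD j 0)).set j (arr.getD i 0)

-- the chain of the two 'if … < …: smallest = …' updates in heapify
def pickS1 (arr : List Int) (n i : Nat) : Nat :=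
  if 2*i+1 < n ∧ arr.getD (2*i+1) 0 < arr.getD i 0 then 2*i+1 else i

def pickSmallest (arr : List Int) (n i : Nat) : Nat :=
  if 2*i+2 < n ∧ arr.getD (2*i+2) 0 < arr.getD (pickS1 arr n i) 0 then 2*i+2
  else pickS1 arr n i

theorem pickSmallest_bounds (arr : List Int) (n i : Nat) :
    pickSmallest arr n i ≠ i → i < pickSmallest arr n i ∧ pickSmallest arr n i < n := by
  intro h
  unfold pickSmallest pickS1 at *
  split_ifs at * <;> omega

def heapifyA (arr : List Int) (n i : Nat) : List Int :=
  let s := pickSmallest arr n i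
  if h : s ≠ i then heapifyA (pySwap arr i s) n s else arr
termination_by n - i
decreasing_by
  have := pickSmallest_bounds arr n i h; omega

-- for i in range((len(arr)//2)-1, -1, -1): heapify(arr, len(arr), i)   — i runs i, i-1, …, 0
def buildLoop (arr : List Int) (n i : Nat) : List Int :=
  if i = 0 then heapifyA arr n i else buildLoop (heapifyA arr n i) n (i - 1)
termination_by i

def buildHeap (arr : List Int) : List Int :=
  if arr.length / 2 = 0 then arr else buildLoop arr arr.length (arr.length / 2 - 1)

def loopA (Q : List (List Int)) (heap sol : List Int) : List Int :=
  match Q with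
  | [] => sol
  | q :: rest =>
    if q.getD 0 0 = 0 then
      loopA rest (buildHeap (heap ++ [q.getD 1 0])) sol
    else if heap = [] then
      loopA rest heap sol
    else
      let smallest := heap.getD 0 0
      let h2 := (pySwap heap 0 (heap.length - 1)).dropLast
      loopA rest (heapifyA h2 h2.length 0) (sol ++ [smallest])

def minHeap (N : Int) (Q : List (List Int)) : List Int := loopA Q [] []

-- ===== PORT B =====

-- k = 0; while k < len(heap) and heap[k] > v: k += 1
def findPos (heap : List Int) (v : Int) : Nat :=
  match heap with
  | [] => 0
  | x :: r => if x > v then findPos r v + 1 else 0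

def loopB (Q : List (List Int)) (heap sol : List Int) : List Int :=
  match Q with
  | [] => sol
  | q :: rest =>
    if q.getD 0 0 = 0 then
      let v := q.getD 1 0
      loopB rest (heap.insertIdx (findPos heap v) v) sol
    else if heap = [] then
      loopB rest heap sol
    else
      loopB rest heap.dropLast (sol ++ [heap.getLast?.getD 0])

def minHeap_alt (N : Int) (Q : List (List Int)) : List Int := loopB Q [] []

-- ===== PRECONDITION & SPEC =====
-- Pre_ excludes exactly the queries on which the Python A raises IndexError:
-- an empty query row (Q[i][0] fails) or an insert row [0] without a value (Q[i][1] fails).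
def Pre_minHeap (N : Int) (Q : List (List Int)) : Prop :=
  ∀ q ∈ Q, q ≠ [] ∧ (q.getD 0 0 = 0 → 2 ≤ q.length)
instance (N : Int) (Q : List (List Int)) : Decidable (Pre_minHeap N Q) := by
  unfold Pre_minHeap; infer_instance

def pvWitness_minHeap : Int × List (List Int) := (5, [[0, 3], [0, 1], [1], [0, 2], [1], [1]])

def Spec_minHeap (N : Int) (Q : List (List Int)) (out : List Int) : Prop := out = minHeap_alt N Q
instance (N : Int) (Q : List (List Int)) (out : List Int) : Decidable (Spec_minHeap N Q out) := by
  unfold Spec_minHeap; infer_instance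

-- ===== CLAIM (what is proved, stated in full; the proofs are below) =====
def Claim_equal_minHeap : Prop := ∀ (N : Int) (Q : List (List Int)), Dom_minHeap N Q → Pre_minHeap N Q → Spec_minHeap N Q (minHeap N Q)

-- ===== LEMMAS AND PROOFS =====

-- partial heap property: every parent/child pair with parent index ≥ k is ordered
def PH (arr : List Int) (k : Nat) : Prop :=
  ∀ p c : Nat, k ≤ p → c < arr.length → (c = 2*p+1 ∨ c = 2*p+2) → arr.getD p 0 ≤ arr.getD c 0

-- j lies in the subtree rooted at i
def inSub (i j : Nat) : Bool :=
  if j < i then false else if j = i then true else inSub i ((j-1)/2)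
termination_by j
decreasing_by omega

def sortedDesc (l : List Int) : Prop := List.Pairwise (fun a b : Int => b ≤ a) l

theorem inSub_self (i : Nat) : inSub i i = true := by
  unfold inSub; simp

theorem inSub_le : ∀ i j, inSub i j = true → i ≤ j := by
  intro i j
  induction j using Nat.strong_induction_on with
  | _ j IH =>
    unfold inSub
    split_ifs with h1 h2 <;> intro h <;> simp_all

theorem inSub_parent (i j : Nat) (hne : j ≠ i) (h : inSub i j = true) :
    inSub i ((j-1)/2) = true := by
  rw [inSub] at h
  split_ifs at h
  exact h

theorem inSub_child (i j : Nat) (h : inSub i j = true) :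
    inSub i (2*j+1) = true ∧ inSub i (2*j+2) = true := by
  have hij := inSub_le i j h
  constructor
  · rw [inSub]; split_ifs with h1 h2
    · omega
    · rfl
    · have : (2*j+1-1)/2 = j := by omega
      rwa [this]
  · rw [inSub]; split_ifs with h1 h2
    · omega
    · rfl
    · have : (2*j+2-1)/2 = j := by omega
      rwa [this]

theorem inSub_trans : ∀ s j, inSub s j = true → ∀ i, inSub i s = true → inSub i j = true := by
  intro s j
  induction j using Nat.strong_induction_on with
  | _ j IH =>
    intro hsj i his
    by_cases hje : j = s
    · subst hje; exact his
    · have hs := inSub_le s j hsj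
      have hp := inSub_parent s j hje hsj
      have : (j-1)/2 < j := by omega
      have := IH _ this hp i his
      rw [inSub]
      have hi := inSub_le i s his
      split_ifs with h1 h2
      · omega
      · rfl
      · exact this

theorem not_inSub_of_lt (i j : Nat) (h : j < i) : inSub i j = false := by
  unfold inSub; simp [h]

theorem inSub_false_step (s c : Nat) (hne : c ≠ s) (h : inSub s ((c-1)/2) = false) :
    inSub s c = false := by
  rw [inSub]
  by_cases h1 : c < s
  · simp [h1]
  · by_cases h2 : c = s
    · exact absurd h2 hne
    · simp [h1, h2, h]

-- pickSmallest facts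
theorem pickSmallest_child (arr : List Int) (n i : Nat) (h : pickSmallest arr n i ≠ i) :
    pickSmallest arr n i = 2*i+1 ∨ pickSmallest arr n i = 2*i+2 := by
  unfold pickSmallest pickS1 at *
  split_ifs at * <;> omega

theorem pickSmallest_min (arr : List Int) (n i : Nat) :
    (2*i+1 < n → arr.getD (pickSmallest arr n i) 0 ≤ arr.getD (2*i+1) 0) ∧
    (2*i+2 < n → arr.getD (pickSmallest arr n i) 0 ≤ arr.getD (2*i+2) 0) ∧
    arr.getD (pickSmallest arr n i) 0 ≤ arr.getD i 0 := by
  unfold pickSmallest pickS1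
  split_ifs <;> refine ⟨?_, ?_, ?_⟩ <;> intros <;> omega

-- pySwap facts
theorem length_pySwap (arr : List Int) (i j : Nat) : (pySwap arr i j).length = arr.length := by
  simp [pySwap]

theorem getD_pySwap_other (arr : List Int) (i j k : Nat) (hki : k ≠ i) (hkj : k ≠ j) :
    (pySwap arr i j).getD k 0 = arr.getD k 0 := by
  simp [pySwap, List.getD_eq_getElem?_getD, List.getElem?_set_ne (Ne.symm hkj), List.getElem?_set_ne (Ne.symm hki)]

theorem getD_pySwap_snd (arr : List Int) (i j : Nat) (hi : i < arr.length) (hj : j < arr.length) :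
    (pySwap arr i j).getD j 0 = arr.getD i 0 := by
  rw [pySwap, List.getD_eq_getElem?_getD, List.getElem?_set_self (by simpa using hj)]
  simp [List.getElem?_eq_getElem hi, List.getD_eq_getElem?_getD]

theorem getD_pySwap_fst (arr : List Int) (i j : Nat) (hi : i < arr.length) (hj : j < arr.length) :
    (pySwap arr i j).getD i 0 = arr.getD j 0 := by
  by_cases hij : i = j
  · subst hij; exact getD_pySwap_snd arr i i hi hi
  · rw [pySwap, List.getD_eq_getElem?_getD, List.getElem?_set_ne (by omega),
      List.getElem?_set_self (by simpa using hi)]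
    simp [List.getElem?_eq_getElem hj, List.getD_eq_getElem?_getD]

theorem set_cons_perm : ∀ (t : List Int) (m : Nat) (a : Int), m < t.length →
    (t.getD m 0 :: t.set m a).Perm (a :: t) := by
  intro t
  induction t with
  | nil => intro m a h; simp at h
  | cons b t' ih =>
    intro m a h
    cases m with
    | zero => simpa using List.Perm.swap a b t'
    | succ m =>
      simp only [List.getD_cons_succ, List.set_cons_succ]
      exact (List.Perm.swap b _ _).trans
        (((ih m a (by simpa using h)).cons b).trans (List.Perm.swap a b t'))

theorem pySwap_perm : ∀ (arr : List Int) (i j : Nat), i < arr.length → j < arr.length →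
    (pySwap arr i j).Perm arr := by
  intro arr
  induction arr with
  | nil => intro i j hi _; simp at hi
  | cons a t ih =>
    intro i j hi hj
    cases i with
    | zero =>
      cases j with
      | zero => simp [pySwap]
      | succ m =>
        simp only [pySwap, List.getD_cons_succ, List.getD_cons_zero, List.set_cons_zero,
          List.set_cons_succ]
        exact set_cons_perm t m a (by simpa using hj)
    | succ m =>
      cases j with
      | zero =>
        simp only [pySwap, List.getD_cons_succ, List.getD_cons_zero, List.set_cons_zero,
          List.set_cons_succ]
        exact set_cons_perm t m a (by simpa using hi)
      | succ k =>
        simp only [pySwap, List.getD_cons_succ, List.set_cons_succ]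
        exact (ih m k (by simpa using hi) (by simpa using hj)).cons a

-- heapify facts
theorem length_heapifyA : ∀ n arr i, (heapifyA arr n i).length = arr.length := by
  intro n arr i
  induction arr, i using heapifyA.induct n with
  | case1 arr i s hne ih =>
    rw [heapifyA, dif_pos hne, ih, length_pySwap]
  | case2 arr i s hne =>
    rw [heapifyA, dif_neg hne]

theorem heapifyA_perm : ∀ n arr i, n ≤ arr.length → (heapifyA arr n i).Perm arr := by
  intro n arr i
  induction arr, i using heapifyA.induct n with
  | case1 arr i s hne ih =>
    intro hn
    obtain ⟨his, hsn⟩ := pickSmallest_bounds arr n i hne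
    rw [heapifyA, dif_pos hne]
    exact (ih (by rw [length_pySwap]; exact hn)).trans
      (pySwap_perm arr i _ (by omega) (by omega))
  | case2 arr i s hne =>
    intro _
    rw [heapifyA, dif_neg hne]

theorem heapifyA_untouched : ∀ n arr i, ∀ j, inSub i j = false →
    (heapifyA arr n i).getD j 0 = arr.getD j 0 := by
  intro n arr i
  induction arr, i using heapifyA.induct n with
  | case1 arr i s hne ih =>
    intro j hj
    obtain hs | hs := pickSmallest_child arr n i hne
    all_goals {
      rw [heapifyA, dif_pos hne]
      have hsub : inSub i (pickSmallest arr n i) = true := by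
        rw [hs]
        first
          | exact (inSub_child i i (inSub_self i)).1
          | exact (inSub_child i i (inSub_self i)).2
      have hji : j ≠ i := by
        intro h; subst h; rw [inSub_self] at hj; simp at hj
      have hjs : j ≠ pickSmallest arr n i := by
        intro h; subst h; rw [hsub] at hj; simp at hj
      have hsj : inSub (pickSmallest arr n i) j = false := by
        by_contra hc
        simp only [Bool.not_eq_false] at hc
        rw [inSub_trans _ _ hc _ hsub] at hj
        simp at hj
      rw [ih _ hsj, getD_pySwap_other arr i _ j hji hjs]
    }
  | case2 arr i s hne =>
    intro j hj
    rw [heapifyA, dif_neg hne]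

theorem heapifyA_lb : ∀ n arr i, ∀ b : Int, n = arr.length →
    (∀ j, inSub i j = true → j < n → b ≤ arr.getD j 0) →
    ∀ j, inSub i j = true → j < n → b ≤ (heapifyA arr n i).getD j 0 := by
  intro n arr i
  induction arr, i using heapifyA.induct n with
  | case1 arr i s hne ih =>
    intro b hn hb j hj hjn
    obtain ⟨his, hsn⟩ := pickSmallest_bounds arr n i hne
    have hschild : inSub i (pickSmallest arr n i) = true := by
      obtain hs | hs := pickSmallest_child arr n i hne <;> rw [hs]
      · exact (inSub_child i i (inSub_self i)).1
      · exact (inSub_child i i (inSub_self i)).2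
    rw [heapifyA, dif_pos hne]
    by_cases hsj : inSub (pickSmallest arr n i) j = true
    · refine ih b (by rw [length_pySwap]; exact hn) ?_ j hsj hjn
      intro k hk hkn
      by_cases hks : k = pickSmallest arr n i
      · subst hks
        rw [getD_pySwap_snd arr i _ (by omega) (by omega)]
        exact hb i (inSub_self i) (by omega)
      · have hki : k ≠ i := by
          have := inSub_le _ _ hk; omega
        rw [getD_pySwap_other arr i _ k hki hks]
        exact hb k (inSub_trans _ _ hk _ hschild) hkn
    · rw [heapifyA_untouched _ _ _ j (by simpa using hsj)]
      by_cases hji : j = i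
      · rw [hji, getD_pySwap_fst arr i _ (by omega) (by omega)]
        exact hb _ hschild (by omega)
      · have hjs : j ≠ pickSmallest arr n i := by
          intro h; subst h; rw [inSub_self] at hsj; simp at hsj
        rw [getD_pySwap_other arr i _ j hji hjs]
        exact hb j hj hjn
  | case2 arr i s hne =>
    intro b hn hb j hj hjn
    rw [heapifyA, dif_neg hne]
    exact hb j hj hjn

theorem PH_sub_bound (arr : List Int) (k : Nat) (hPH : PH arr k) :
    ∀ j, ∀ s, k ≤ s → inSub s j = true → j < arr.length → arr.getD s 0 ≤ arr.getD j 0 := by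
  intro j
  induction j using Nat.strong_induction_on with
  | _ j IH =>
    intro s hks hj hjn
    by_cases hje : j = s
    · subst hje; exact le_refl _
    · have hs := inSub_le s j hj
      have hp := inSub_parent s j hje hj
      have hps := inSub_le s ((j-1)/2) hp
      have h1 : (j-1)/2 < j := by omega
      have h2 : j = 2*((j-1)/2)+1 ∨ j = 2*((j-1)/2)+2 := by omega
      exact (IH _ h1 s hks hp (by omega)).trans (hPH _ j (by omega) hjn h2)

theorem heapifyA_PH : ∀ n arr i, n = arr.length → PH arr (i+1) → PH (heapifyA arr n i) i := by
  intro n arr i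
  induction arr, i using heapifyA.induct n with
  | case2 arr i s hne =>
    -- no swap: pickSmallest = i, so arr[i] ≤ both children
    intro hn hPH
    rw [heapifyA, dif_neg hne]
    simp only [ne_eq, not_not] at hne
    have hs' : pickSmallest arr n i = i := hne
    intro p c hp hc hch
    rcases Nat.lt_or_ge i p with hpi | hpi
    · exact hPH p c (by omega) hc hch
    · have hpi : p = i := by omega
      rw [hpi] at hch ⊢
      obtain ⟨m1, m2, _⟩ := pickSmallest_min arr n i
      rw [hs'] at m1 m2
      rcases hch with h | h <;> subst h
      · exact m1 (by omega)
      · exact m2 (by omega)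
  | case1 arr i s hne ih =>
    intro hn hPH
    obtain ⟨his, hsn⟩ := pickSmallest_bounds arr n i hne
    obtain ⟨m1, m2, m3⟩ := pickSmallest_min arr n i
    have hschild := pickSmallest_child arr n i hne
    have hsub : inSub i (pickSmallest arr n i) = true := by
      obtain hs | hs := hschild <;> rw [hs]
      · exact (inSub_child i i (inSub_self i)).1
      · exact (inSub_child i i (inSub_self i)).2
    have hSle : pickSmallest arr n i ≤ 2*i+2 := by
      obtain hs | hs := hschild <;> omega
    rw [heapifyA, dif_pos hne]
    show PH (heapifyA (pySwap arr i (pickSmallest arr n i)) n (pickSmallest arr n i)) i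
    have hlen' : (pySwap arr i (pickSmallest arr n i)).length = arr.length :=
      length_pySwap arr i _
    have hPH' : PH (pySwap arr i (pickSmallest arr n i)) (pickSmallest arr n i + 1) := by
      intro p c hp hc hch
      rw [hlen'] at hc
      rw [getD_pySwap_other arr i _ p (by omega) (by omega),
        getD_pySwap_other arr i _ c (by omega) (by omega)]
      exact hPH p c (by omega) hc hch
    have hres : PH (heapifyA (pySwap arr i (pickSmallest arr n i)) n (pickSmallest arr n i))
        (pickSmallest arr n i) := ih (by rw [hlen']; exact hn) hPH'
    intro p c hp hc hch
    rw [length_heapifyA, hlen', ← hn] at hc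
    rcases Nat.lt_or_ge p (pickSmallest arr n i) with hps | hps
    swap
    · exact hres p c hps (by rw [length_heapifyA, hlen', ← hn]; exact hc) hch
    -- p < pickSmallest: positions outside the subtree of pickSmallest
    have hii : (heapifyA (pySwap arr i (pickSmallest arr n i)) n (pickSmallest arr n i)).getD i 0
        = arr.getD (pickSmallest arr n i) 0 := by
      rw [heapifyA_untouched n _ _ i (not_inSub_of_lt _ _ his),
        getD_pySwap_fst arr i _ (by omega) (by omega)]
    by_cases hpI : p = i
    · -- p = i : children are 2i+1, 2i+2; one may be pickSmallest itself
      by_cases hcs : c = pickSmallest arr n i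
      · have hbound : ∀ j, inSub (pickSmallest arr n i) j = true → j < n →
            arr.getD (pickSmallest arr n i) 0 ≤ (pySwap arr i (pickSmallest arr n i)).getD j 0 := by
          intro j hj hjn
          by_cases hjS : j = pickSmallest arr n i
          · rw [hjS, getD_pySwap_snd arr i _ (by omega) (by omega)]
            exact m3
          · have hji : j ≠ i := by have := inSub_le _ _ hj; omega
            rw [getD_pySwap_other arr i _ j hji hjS]
            exact PH_sub_bound arr (i+1) hPH j (pickSmallest arr n i) (by omega) hj (by omega)
        have hlb := heapifyA_lb n (pySwap arr i (pickSmallest arr n i)) (pickSmallest arr n i)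
          (arr.getD (pickSmallest arr n i) 0) (by rw [hlen']; exact hn) hbound c
          (by rw [hcs]; exact inSub_self _) (by omega)
        rw [hpI, hii]
        exact hlb
      · -- c is the other child of i: untouched
        have hchI : c = 2*i+1 ∨ c = 2*i+2 := by rw [hpI] at hch; exact hch
        have hpar : (c-1)/2 = i := by rcases hchI with h | h <;> omega
        have hnotsub : inSub (pickSmallest arr n i) c = false :=
          inSub_false_step _ _ hcs (by rw [hpar]; exact not_inSub_of_lt _ _ his)
        have hcval : (heapifyA (pySwap arr i (pickSmallest arr n i)) n
            (pickSmallest arr n i)).getD c 0 = arr.getD c 0 := by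
          rw [heapifyA_untouched n _ _ c hnotsub,
            getD_pySwap_other arr i _ c (by omega) hcs]
        rw [hpI, hii, hcval]
        rcases hchI with h | h <;> subst h
        · exact m1 (by omega)
        · exact m2 (by omega)
    · -- i < p < pickSmallest : pair untouched
      have hcS : pickSmallest arr n i < c := by
        rcases hch with h | h <;> omega
      have hpns : inSub (pickSmallest arr n i) p = false := not_inSub_of_lt _ _ hps
      have hpar : (c-1)/2 = p := by rcases hch with h | h <;> omega
      have hcns : inSub (pickSmallest arr n i) c = false :=
        inSub_false_step _ _ (by omega) (by rw [hpar]; exact not_inSub_of_lt _ _ hps)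
      rw [heapifyA_untouched n _ _ p hpns, heapifyA_untouched n _ _ c hcns,
        getD_pySwap_other arr i _ p (by omega) (by omega),
        getD_pySwap_other arr i _ c (by omega) (by omega)]
      exact hPH p c (by omega) (by omega) hch

-- descending-sorted insert (B) facts
theorem insB_perm (heap : List Int) (v : Int) :
    (heap.insertIdx (findPos heap v) v).Perm (v :: heap) := by
  induction heap with
  | nil => simp [findPos]
  | cons x r ih =>
    rw [findPos]
    split_ifs with h
    · rw [List.insertIdx_succ_cons]
      exact (ih.cons x).trans (List.Perm.swap v x r)
    · rw [List.insertIdx_zero]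

theorem insB_sorted (heap : List Int) (v : Int) (hs : sortedDesc heap) :
    sortedDesc (heap.insertIdx (findPos heap v) v) := by
  induction heap with
  | nil => simp [findPos, sortedDesc]
  | cons x r ih =>
    simp only [sortedDesc, List.pairwise_cons] at hs
    obtain ⟨hx, hr⟩ := hs
    rw [findPos]
    split_ifs with h
    · rw [List.insertIdx_succ_cons]; simp only [sortedDesc, List.pairwise_cons]
      constructor
      · intro y hy
        rcases List.mem_cons.mp ((insB_perm r v).mem_iff.mp hy) with hy | hy
        · subst hy; omega
        · exact hx y hy
      · exact ih hr
    · rw [List.insertIdx_zero]; simp only [sortedDesc, List.pairwise_cons]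
      refine ⟨?_, ?_⟩
      · intro y hy
        rcases List.mem_cons.mp hy with hy | hy
        · omega
        · exact (hx y hy).trans (by omega)
      · exact ⟨hx, hr⟩

theorem getLast_min (heap : List Int) (hs : sortedDesc heap) :
    ∀ x ∈ heap, heap.getLast?.getD 0 ≤ x := by
  induction heap with
  | nil => intro x hx; simp at hx
  | cons a r ih =>
    simp only [sortedDesc, List.pairwise_cons] at hs
    obtain ⟨ha, hr⟩ := hs
    intro x hx
    cases r with
    | nil =>
      simp at hx ⊢; omega
    | cons b r' =>
      rw [List.getLast?_cons_cons]
      rcases List.mem_cons.mp hx with hx | hx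
      · subst hx
        exact (ih hr b (List.mem_cons_self)).trans (ha b (List.mem_cons_self))
      · exact ih hr x hx

theorem dropLast_getD (l : List Int) (k : Nat) (hk : k < l.length - 1) :
    l.dropLast.getD k 0 = l.getD k 0 := by
  rw [List.getD_eq_getElem?_getD, List.getD_eq_getElem?_getD]
  rw [List.getElem?_eq_getElem (by simp; omega), List.getElem?_eq_getElem (by omega)]
  simp [List.getElem_dropLast]

theorem getD_mem (l : List Int) (hl : l ≠ []) : l.getD 0 0 ∈ l := by
  cases l with
  | nil => simp at hl
  | cons a r => simp

theorem getLast?D_mem (l : List Int) (hl : l ≠ []) : l.getLast?.getD 0 ∈ l := by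
  rw [List.getLast?_eq_some_getLast hl]
  simp [List.getLast_mem]

theorem inSub_zero : ∀ j, inSub 0 j = true := by
  intro j
  induction j using Nat.strong_induction_on with
  | _ j IH =>
    rw [inSub]
    split_ifs with h1 h2
    · omega
    · rfl
    · exact IH _ (by omega)

theorem root_min (arr : List Int) (hPH : PH arr 0) : ∀ x ∈ arr, arr.getD 0 0 ≤ x := by
  intro x hx
  obtain ⟨j, hj, hxj⟩ := List.mem_iff_getElem.mp hx
  have := PH_sub_bound arr 0 hPH j 0 (by omega) (inSub_zero j) hj
  have hgj : arr.getD j 0 = x := by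
    rw [List.getD_eq_getElem?_getD, List.getElem?_eq_getElem hj]
    simpa using hxj
  rwa [hgj] at this

theorem dropLast_concat_getLastD (l : List Int) (h : l ≠ []) :
    l.dropLast ++ [l.getLast?.getD 0] = l := by
  rw [List.getLast?_eq_some_getLast h]
  exact List.dropLast_concat_getLast h

-- buildLoop / buildHeap facts
theorem buildLoop_perm : ∀ n arr i, n ≤ arr.length → (buildLoop arr n i).Perm arr := by
  intro n arr i
  induction arr, i using buildLoop.induct n with
  | case1 arr =>
    intro hn
    rw [buildLoop, if_pos rfl]
    exact heapifyA_perm n arr 0 hn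
  | case2 arr i h ih =>
    intro hn
    rw [buildLoop, if_neg h]
    exact (ih (by rw [length_heapifyA]; exact hn)).trans (heapifyA_perm n arr i hn)

theorem buildLoop_PH : ∀ n arr i, n = arr.length → PH arr (i+1) → PH (buildLoop arr n i) 0 := by
  intro n arr i
  induction arr, i using buildLoop.induct n with
  | case1 arr =>
    intro hn hPH
    rw [buildLoop, if_pos rfl]
    exact heapifyA_PH n arr 0 hn hPH
  | case2 arr i h ih =>
    intro hn hPH
    rw [buildLoop, if_neg h]
    refine ih (by rw [length_heapifyA]; exact hn) ?_
    have := heapifyA_PH n arr i hn hPH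
    have hi : i - 1 + 1 = i := by omega
    rwa [hi]

theorem buildHeap_perm (arr : List Int) : (buildHeap arr).Perm arr := by
  unfold buildHeap
  split_ifs with h
  · exact List.Perm.refl arr
  · exact buildLoop_perm _ arr _ (le_refl _)

theorem buildHeap_PH (arr : List Int) : PH (buildHeap arr) 0 := by
  unfold buildHeap
  split_ifs with h
  · intro p c hp hc hch
    omega
  · refine buildLoop_PH _ arr _ rfl ?_
    intro p c hp hc hch
    omega

theorem loops_eq : ∀ (Q : List (List Int)) (hA hB sol : List Int),
    hA.Perm hB → PH hA 0 → sortedDesc hB → loopA Q hA sol = loopB Q hB sol := by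
  intro Q
  induction Q with
  | nil => intros; rw [loopA, loopB]
  | cons q rest ih =>
    intro hA hB sol hperm hPH hsort
    rw [loopA, loopB]
    by_cases hq : q.getD 0 0 = 0
    · rw [if_pos hq, if_pos hq]
      refine ih _ _ _ ?_ (buildHeap_PH _) (insB_sorted hB _ hsort)
      exact ((buildHeap_perm _).trans
        ((List.perm_append_singleton _ hA).trans (hperm.cons _))).trans (insB_perm hB _).symm
    · rw [if_neg hq, if_neg hq]
      by_cases hAe : hA = []
      · have hBe : hB = [] := by
          subst hAe
          exact Eq.symm (List.Perm.nil_eq hperm)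
        rw [if_pos hAe, if_pos hBe]
        exact ih _ _ _ hperm hPH hsort
      · have hBe : hB ≠ [] := by
          intro h; subst h
          exact hAe (Eq.symm (List.Perm.nil_eq hperm.symm))
        rw [if_neg hAe, if_neg hBe]
        have hlen : 0 < hA.length := List.length_pos_iff.mpr hAe
        have hswlen : (pySwap hA 0 (hA.length - 1)).length = hA.length := length_pySwap _ _ _
        have hswne : pySwap hA 0 (hA.length - 1) ≠ [] := by
          intro h
          rw [h] at hswlen
          simp at hswlen
          omega
        -- the extracted minima coincide
        have hmB : hB.getLast?.getD 0 = hA.getD 0 0 := by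
          have h1 : ∀ x ∈ hA, hA.getD 0 0 ≤ x := root_min hA hPH
          have h2 : ∀ x ∈ hB, hB.getLast?.getD 0 ≤ x := getLast_min hB hsort
          have hmemA : hA.getD 0 0 ∈ hB := hperm.mem_iff.mp (getD_mem hA hAe)
          have hmemB : hB.getLast?.getD 0 ∈ hA := hperm.symm.mem_iff.mp (getLast?D_mem hB hBe)
          exact le_antisymm (h2 _ hmemA) (h1 _ hmemB)
        -- the swapped-and-popped heap is a permutation of hB.dropLast
        have hkey : (pySwap hA 0 (hA.length - 1)).dropLast ++ [hA.getD 0 0]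
            = pySwap hA 0 (hA.length - 1) := by
          have := dropLast_concat_getLastD _ hswne
          rwa [List.getLast?_eq_some_getLast hswne, List.getLast_eq_getElem,
            ← List.getD_eq_getElem _ 0, hswlen, getD_pySwap_snd hA 0 (hA.length - 1) (by omega) (by omega)] at this
        have hperm2 : ((pySwap hA 0 (hA.length - 1)).dropLast).Perm hB.dropLast := by
          refine (List.perm_append_right_iff [hA.getD 0 0]).mp ?_
          rw [hkey]
          refine ((pySwap_perm hA 0 (hA.length - 1) (by omega) (by omega)).trans hperm).trans ?_
          rw [← hmB]
          exact (List.Perm.of_eq (dropLast_concat_getLastD hB hBe)).symm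
        have hPH2 : PH ((pySwap hA 0 (hA.length - 1)).dropLast) 1 := by
          intro p c hp hc hch
          have hlen2 : ((pySwap hA 0 (hA.length - 1)).dropLast).length = hA.length - 1 := by
            rw [List.length_dropLast, hswlen]
          rw [hlen2] at hc
          rw [dropLast_getD _ p (by omega), dropLast_getD _ c (by omega),
            getD_pySwap_other hA 0 _ p (by omega) (by omega),
            getD_pySwap_other hA 0 _ c (by omega) (by omega)]
          exact hPH p c (by omega) (by omega) hch
        rw [hmB]
        refine ih _ _ _ ?_ ?_ (List.Pairwise.sublist (List.dropLast_sublist hB) hsort)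
        · exact (heapifyA_perm _ _ 0 (le_refl _)).trans hperm2
        · exact heapifyA_PH _ _ 0 rfl hPH2

-- ===== VERDICT (by name: the statement is the Claim_ definition above) =====
theorem minHeap_spec : Claim_equal_minHeap := by
  intro N Q _ _
  unfold Spec_minHeap minHeap minHeap_alt
  exact loops_eq Q [] [] [] (List.Perm.refl _) (by intro p c _ hc _; simp at hc) (by simp [sortedDesc])
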